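-- pv_equiv track=rewrite | github.com/Lorient2211/HW_prof2_regEX | doubles_shall_not_pass.py | doubles_remuver
-- ===== SOURCE A (Python) =====
-- def doubles_remuver(contacts_list1):
--     dict_names = {}
--
--
--     for lastname in contacts_list1:
--         if lastname[0] not in dict_names.keys():
--             dict_names[lastname[0]] = lastname
--
--         else:
--             ind = 0
--             for gaps in dict_names[lastname[0]]:
--                 if gaps == '':
--                     dict_names[lastname[0]][ind] = lastname[ind]
--                 ind += 1
--     return dict_names.values()
-- ===== SOURCE B (Python) =====
-- def doubles_remuver(contacts_list1):
--     groups = {}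
--     for rec in contacts_list1:
--         groups.setdefault(rec[0], []).append(rec)
--     result = {}
--     for key, group in groups.items():
--         base = group[0]
--         for rec in group[1:]:
--             for i in range(len(base)):
--                 if base[i] == '':
--                     base[i] = rec[i]
--         result[key] = base
--     return result.values()
-- ===== Notes on version B (the rewrite author's own statement) =====
-- stated objective: alternative
-- what changed: Instead of threading the merge through one dict while scanning (merge-on-collision into the stored record), B first groups the records by their first field with setdefault/append and then, in a second pass over the groups, folds each group's tail into its first record; same O(n*m) cost, different decomposition. Pre_ excludes exactly the inputs on which A raises IndexError (an empty record, or a record shorter than its key's merged record while an empty slot sits at a missing position); B raises there too.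
import Mathlib
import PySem

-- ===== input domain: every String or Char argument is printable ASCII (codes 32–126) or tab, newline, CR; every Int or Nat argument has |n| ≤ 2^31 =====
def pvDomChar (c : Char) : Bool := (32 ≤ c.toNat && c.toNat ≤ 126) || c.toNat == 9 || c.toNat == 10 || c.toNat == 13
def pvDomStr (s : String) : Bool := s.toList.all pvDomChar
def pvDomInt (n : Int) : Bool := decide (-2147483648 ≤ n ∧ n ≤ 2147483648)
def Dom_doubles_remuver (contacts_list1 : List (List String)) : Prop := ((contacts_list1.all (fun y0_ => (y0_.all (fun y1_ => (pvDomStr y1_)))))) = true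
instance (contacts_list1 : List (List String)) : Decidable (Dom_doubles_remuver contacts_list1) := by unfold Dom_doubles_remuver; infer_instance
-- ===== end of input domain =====

-- B regroups the work: first collect the records by their first field (setdefault/append), then
-- fold each group's tail into its first record — a different decomposition, same cost ("alternative").
-- Both Pythons mutate the first-occurrence inner lists in place; the equivalence proved here is
-- about the RETURN value only.


-- ===== PORT A =====
-- inner merge loop: `for gaps in dict_names[lastname[0]]: if gaps == '': stored[ind] = lastname[ind]; ind += 1`.
-- `lastname[ind]` raises IndexError when out of range (pyGet? = none); Pre_ excludes those inputs,
-- the `.getD` dummy is never reached inside Pre_.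
def pvMergeA (stored lastname : List String) : List String :=
  (PySem.List.enumerate stored).map (fun gi =>
    if gi.2 = "" then (PySem.List.pyGet? lastname gi.1).getD gi.2 else gi.2)

-- one iteration of A's main loop; `lastname[0]` raises on an empty record (excluded by Pre_)
def pvStepA (dict_names : PySem.Dict String (List String)) (lastname : List String) :
    PySem.Dict String (List String) :=
  match dict_names.get? ((PySem.List.pyGet? lastname 0).getD "") with
  | none => dict_names.insert ((PySem.List.pyGet? lastname 0).getD "") lastname
  | some stored => dict_names.insert ((PySem.List.pyGet? lastname 0).getD "") (pvMergeA stored lastname)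

def doubles_remuver (contacts_list1 : List (List String)) : List (List String) :=
  (contacts_list1.foldl pvStepA PySem.Dict.empty).values

-- ===== PORT B =====
-- inner fill loop of B: `for i in range(len(base)): if base[i] == '': base[i] = rec[i]`
def pvFillB (base rec : List String) : List String :=
  (List.range base.length).map (fun i =>
    if base.getD i "" = "" then (PySem.List.pyGet? rec (i : Int)).getD "" else base.getD i "")

-- `groups.setdefault(rec[0], []).append(rec)`: the key's list (or []) gains rec at the end, position kept
def pvGroupStepB (groups : PySem.Dict String (List (List String))) (rec : List String) :
    PySem.Dict String (List (List String)) :=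
  groups.insert (rec.headD "") (groups.getD (rec.headD "") [] ++ [rec])

-- `base = group[0]; for rec in group[1:]: …fill…`
def pvMergeGroupB (group : List (List String)) : List String :=
  (group.drop 1).foldl pvFillB (group.headD [])

def doubles_remuver_alt (contacts_list1 : List (List String)) : List (List String) :=
  let groups := contacts_list1.foldl pvGroupStepB PySem.Dict.empty
  let result := groups.items.foldl
      (fun result kg => result.insert kg.1 (pvMergeGroupB kg.2)) PySem.Dict.empty
  result.values

-- ===== PRECONDITION & SPEC =====
-- Pre_ excludes exactly the inputs on which the Python A raises IndexError (B raises there too):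
-- an empty record, or a record xs[j] shorter than the first record xs[m] of its key while the merged
-- record still holds '' at some position i ≥ len(xs[j]): the first record has '' at i and no
-- same-key record strictly between m and j supplies a non-'' value at i.  (Stated as a Bool over
-- bounded index ranges so it is trivially decidable; it inspects the input only.)
def pvHead (xs : List (List String)) (m : Nat) : String := (xs.getD m []).headD ""
def pvSlot (xs : List (List String)) (m i : Nat) : String := (xs.getD m []).getD i ""
def Pre_doubles_remuver (contacts_list1 : List (List String)) : Prop :=
  (contacts_list1.all (fun r => !r.isEmpty) &&
   (List.range contacts_list1.length).all (fun m =>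
     ((List.range m).any (fun k => pvHead contacts_list1 k == pvHead contacts_list1 m)) ||
     (List.range contacts_list1.length).all (fun j =>
       !(decide (m < j) && (pvHead contacts_list1 j == pvHead contacts_list1 m)) ||
       (List.range (contacts_list1.getD m []).length).all (fun i =>
         decide (i < (contacts_list1.getD j []).length) ||
         !(pvSlot contacts_list1 m i == "") ||
         ((List.range j).any (fun t =>
           decide (m < t) && (pvHead contacts_list1 t == pvHead contacts_list1 m) &&
           !(pvSlot contacts_list1 t i == ""))))))) = true
instance (contacts_list1 : List (List String)) : Decidable (Pre_doubles_remuver contacts_list1) := by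
  unfold Pre_doubles_remuver; infer_instance

def pvWitness_doubles_remuver : List (List String) := [["a", ""], ["a", "b"], ["c"]]

def Spec_doubles_remuver (contacts_list1 : List (List String)) (out : List (List String)) : Prop := out = doubles_remuver_alt contacts_list1
instance (contacts_list1 : List (List String)) (out : List (List String)) : Decidable (Spec_doubles_remuver contacts_list1 out) := by unfold Spec_doubles_remuver; infer_instance

-- ===== CLAIM (what is proved, stated in full; the proofs are below) =====
def Claim_equal_doubles_remuver : Prop := ∀ (contacts_list1 : List (List String)), Dom_doubles_remuver contacts_list1 → Pre_doubles_remuver contacts_list1 → Spec_doubles_remuver contacts_list1 (doubles_remuver contacts_list1)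

-- ===== LEMMAS AND PROOFS =====

-- A's key expression equals B's
theorem pvKey_eq (r : List String) : ((PySem.List.pyGet? r 0).getD "") = r.headD "" := by
  cases r <;> simp [PySem.List.pyGet?, PySem.List.pyIdx?]

-- the two inner loops compute the same merged record
theorem pvMergeA_eq_fill (b r : List String) : pvMergeA b r = pvFillB b r := by
  apply List.ext_getElem
  · simp [pvMergeA, pvFillB]
  · intro i h1 h2
    simp only [pvMergeA, pvFillB, List.getElem_map, PySem.List.getElem_enumerate,
      List.getElem_range]
    have hi : i < b.length := by simpa [pvMergeA] using h1
    have hb : b.getD i "" = b[i] := List.getD_eq_getElem b "" hi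
    rw [hb]
    by_cases h : b[i] = "" <;> simp [h]

theorem pvMergeGroup_singleton (r : List String) : pvMergeGroupB [r] = r := by
  simp [pvMergeGroupB]

theorem pvMergeGroup_append (g : List (List String)) (r : List String) (hg : g ≠ []) :
    pvMergeGroupB (g ++ [r]) = pvFillB (pvMergeGroupB g) r := by
  obtain ⟨x, t, rfl⟩ := List.exists_cons_of_ne_nil hg
  simp [pvMergeGroupB, List.foldl_append]

-- the abstraction relating A's dict state to B's grouping state: merge every group
def pvF (g : PySem.Dict String (List (List String))) : PySem.Dict String (List String) :=
  PySem.Dict.mk (g.items.map (fun kv => (kv.1, pvMergeGroupB kv.2)))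

theorem pvF_items (g : PySem.Dict String (List (List String))) :
    (pvF g).items = g.items.map (fun kv => (kv.1, pvMergeGroupB kv.2)) := rfl

theorem pvF_contains (g : PySem.Dict String (List (List String))) (k : String) :
    (pvF g).contains k = g.contains k := by
  simp [pvF, PySem.Dict.contains, List.any_map, Function.comp_def]

theorem pvF_get? (g : PySem.Dict String (List (List String))) (k : String) :
    (pvF g).get? k = (g.get? k).map pvMergeGroupB := by
  simp [pvF, PySem.Dict.get?, List.find?_map, Function.comp_def]

theorem pvF_insert (g : PySem.Dict String (List (List String))) (k : String)
    (v : List (List String)) :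
    pvF (g.insert k v) = (pvF g).insert k (pvMergeGroupB v) := by
  apply PySem.Dict.ext
  rw [pvF_items, PySem.Dict.items_insert, PySem.Dict.items_insert, pvF_contains, pvF_items]
  by_cases h : g.contains k = true
  · simp only [h, if_true, List.map_map]
    apply List.map_congr_left
    intro p _
    by_cases hp : p.1 = k <;> simp [hp]
  · simp [h]

theorem pvStep_comm (g : PySem.Dict String (List (List String))) (r : List String)
    (hg : ∀ p ∈ g.items, p.2 ≠ []) :
    pvStepA (pvF g) r = pvF (pvGroupStepB g r) := by
  unfold pvStepA pvGroupStepB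
  rw [pvKey_eq, pvF_get?]
  cases hc : g.get? (r.headD "") with
  | none =>
      rw [PySem.Dict.getD_of_get?_eq_none g _ hc]
      simp [pvF_insert, pvMergeGroup_singleton]
  | some group =>
      have hmem : (r.headD "", group) ∈ g.items := PySem.Dict.mem_items_of_get?_eq_some g hc
      have hne : group ≠ [] := hg _ hmem
      rw [PySem.Dict.getD_of_get?_eq_some g _ hc]
      simp only [Option.map_some]
      rw [pvF_insert, pvMergeGroup_append group r hne, pvMergeA_eq_fill]

theorem pvGroupStep_ne (g : PySem.Dict String (List (List String))) (r : List String)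
    (hg : ∀ p ∈ g.items, p.2 ≠ []) :
    ∀ p ∈ (pvGroupStepB g r).items, p.2 ≠ [] := by
  intro p hp
  unfold pvGroupStepB at hp
  rcases (PySem.Dict.mem_items_insert _ _ _ _).1 hp with h | h
  · subst h; simp
  · exact hg _ h.1

theorem pvMain_fold (xs : List (List String)) :
    ∀ g : PySem.Dict String (List (List String)), (∀ p ∈ g.items, p.2 ≠ []) →
      xs.foldl pvStepA (pvF g) = pvF (xs.foldl pvGroupStepB g) := by
  induction xs with
  | nil => intro g _; simp
  | cons r xs ih =>
      intro g hg
      simp only [List.foldl_cons]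
      rw [pvStep_comm g r hg]
      exact ih _ (pvGroupStep_ne g r hg)

theorem pvF_empty : pvF PySem.Dict.empty = PySem.Dict.empty := rfl

theorem pvGroups_nodup (xs : List (List String)) :
    (xs.foldl pvGroupStepB PySem.Dict.empty).keys.Nodup :=
  PySem.Dict.nodup_keys_foldl_insert_key xs (fun r => r.headD "")
    (fun g r => g.getD (r.headD "") [] ++ [r]) PySem.Dict.empty PySem.Dict.nodup_keys_empty

-- ===== VERDICT (by name: the statement is the Claim_ definition above) =====
theorem doubles_remuver_spec : Claim_equal_doubles_remuver := by
  intro xs _ _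
  unfold Spec_doubles_remuver doubles_remuver doubles_remuver_alt
  have hA : xs.foldl pvStepA PySem.Dict.empty = pvF (xs.foldl pvGroupStepB PySem.Dict.empty) := by
    rw [← pvF_empty]
    exact pvMain_fold xs PySem.Dict.empty (by simp [PySem.Dict.empty])
  rw [hA]
  set G := xs.foldl pvGroupStepB PySem.Dict.empty with hG
  have hfresh : (G.items.foldl
      (fun result kg => result.insert kg.1 (pvMergeGroupB kg.2)) PySem.Dict.empty).items
      = PySem.Dict.empty.items ++ G.items.map (fun kg => (kg.1, pvMergeGroupB kg.2)) := by
    apply PySem.Dict.items_foldl_insert_fresh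
    · intro a _; simp
    · exact pvGroups_nodup xs
  simp only [PySem.Dict.values, hfresh, pvF]
  simp [List.map_map, Function.comp_def, PySem.Dict.empty]
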